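-- pv_equiv track=rewrite | github.com/gamert/stock-1 | juchao/PdfCaibao.py | row_is_null_exept
-- ===== SOURCE A (Python) =====
-- def value_is_null(v):
--     return v == None or v == ""
--
-- def row_value_is_null(row, key_index):
--     return value_is_null(row[key_index])
--
-- def row_is_null_exept(row, indexs):
--     for index in range(len(row)):
--         isnull = row_value_is_null(row, index)
--         if index in indexs:
--             if isnull:
--                 return False
--             continue
--         elif not isnull:
--             return False
--     return True
-- ===== SOURCE B (Python) =====
-- def value_is_null(v):
--     return v == None or v == ""
--
-- def row_is_null_exept(row, indexs):
--     nonnull = {i for i in range(len(row)) if not value_is_null(row[i])}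
--     expected = {i for i in indexs if 0 <= i < len(row)}
--     return nonnull == expected
-- ===== Notes on version B (the rewrite author's own statement) =====
-- stated objective: simpler
-- what changed: Replaces A's indexed loop with branch/continue/early-return by building the set of non-null positions and the set of expected in-range positions and comparing them with one set equality.
import Mathlib
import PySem

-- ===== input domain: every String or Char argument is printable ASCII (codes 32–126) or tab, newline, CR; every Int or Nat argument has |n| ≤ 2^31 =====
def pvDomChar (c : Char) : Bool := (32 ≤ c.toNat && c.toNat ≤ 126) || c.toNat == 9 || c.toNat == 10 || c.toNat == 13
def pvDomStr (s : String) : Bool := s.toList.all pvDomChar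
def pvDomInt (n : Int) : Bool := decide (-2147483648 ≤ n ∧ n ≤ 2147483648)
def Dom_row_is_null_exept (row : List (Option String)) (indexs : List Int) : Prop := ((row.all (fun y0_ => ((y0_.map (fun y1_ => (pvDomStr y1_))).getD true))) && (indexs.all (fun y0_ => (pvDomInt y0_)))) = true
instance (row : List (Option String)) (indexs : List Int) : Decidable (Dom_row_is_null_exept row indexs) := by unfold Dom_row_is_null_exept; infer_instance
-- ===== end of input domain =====

-- B replaces A's per-index branch/continue/early-return loop by one set equality
-- (non-null positions vs in-range listed indices); same result, similar cost.

-- ===== PORT A =====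
-- value_is_null(v): v == None or v == ""
def valueIsNull (v : Option String) : Bool := v == none || v == some ""

-- the loop `for index in range(len(row))` walking row with its running index
def rowLoopA (indexs : List Int) : Nat → List (Option String) → Bool
  | _, [] => true
  | i, v :: rest =>
    let isnull := valueIsNull v
    if indexs.contains (i : Int) then
      if isnull then false else rowLoopA indexs (i + 1) rest
    else
      if !isnull then false else rowLoopA indexs (i + 1) rest

def row_is_null_exept (row : List (Option String)) (indexs : List Int) : Bool :=
  rowLoopA indexs 0 row

-- ===== PORT B =====
def row_is_null_exept_alt (row : List (Option String)) (indexs : List Int) : Bool :=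
  let nonnull : PySem.Set Int :=
    PySem.Set.ofList (((List.range row.length).filter
      (fun i : Nat => !(valueIsNull (PySem.List.pyGetD row (i : Int) none)))).map (fun i : Nat => (i : Int)))
  let expected : PySem.Set Int :=
    PySem.Set.ofList (indexs.filter (fun i => decide (0 ≤ i ∧ i < (row.length : Int))))
  PySem.Set.equal nonnull expected

-- ===== PRECONDITION & SPEC =====
def Spec_row_is_null_exept (row : List (Option String)) (indexs : List Int) (out : Bool) : Prop := out = row_is_null_exept_alt row indexs
instance (row : List (Option String)) (indexs : List Int) (out : Bool) : Decidable (Spec_row_is_null_exept row indexs out) := by unfold Spec_row_is_null_exept; infer_instance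

-- ===== CLAIM (what is proved, stated in full; the proofs are below) =====
def Claim_equal_row_is_null_exept : Prop := ∀ (row : List (Option String)) (indexs : List Int), Dom_row_is_null_exept row indexs → Spec_row_is_null_exept row indexs (row_is_null_exept row indexs)

-- ===== LEMMAS AND PROOFS =====

-- one step of A's loop
lemma rowLoopA_step (indexs : List Int) (i : Nat) (v : Option String) (rest : List (Option String)) :
    rowLoopA indexs i (v :: rest) = true ↔
      ((valueIsNull v = true ↔ (i : Int) ∉ indexs) ∧ rowLoopA indexs (i + 1) rest = true) := by
  simp only [rowLoopA]
  cases hn : valueIsNull v <;> by_cases hc : ((i : Int) ∈ indexs) <;>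
    simp [hc]

-- A's loop succeeds iff every position is null exactly when it is not listed in indexs
lemma rowLoopA_iff (indexs : List Int) (l : List (Option String)) : ∀ (i : Nat),
      rowLoopA indexs i l = true ↔
        ∀ j, j < l.length → (valueIsNull (l.getD j none) = true ↔ ((i + j : Nat) : Int) ∉ indexs) := by
  induction l with
  | nil => intro i; simp [rowLoopA]
  | cons v rest ih =>
    intro i
    have hshift : ∀ j : Nat, ((i + 1) + j) = i + (j + 1) := by omega
    rw [rowLoopA_step, ih]
    constructor
    · rintro ⟨h0, hrest⟩ j hj
      cases j with
      | zero => simpa using h0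
      | succ j' =>
        have := hrest j' (by simpa using Nat.lt_of_succ_lt_succ hj)
        simpa [hshift] using this
    · intro hall
      refine ⟨by simpa using hall 0 (by simp), fun j hj => ?_⟩
      have := hall (j + 1) (by simpa using Nat.succ_lt_succ hj)
      simpa [hshift] using this

-- membership in B's nonnull set
lemma mem_nonnull (row : List (Option String)) (x : Int) :
    (x ∈ ((List.range row.length).filter
        (fun i : Nat => !(valueIsNull (PySem.List.pyGetD row (i : Int) none)))).map (fun i : Nat => (i : Int))) ↔
      ∃ j, j < row.length ∧ valueIsNull (row.getD j none) = false ∧ (j : Int) = x := by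
  rw [List.mem_map]
  constructor
  · rintro ⟨j, hj, rfl⟩
    rw [List.mem_filter] at hj
    obtain ⟨hjr, hjp⟩ := hj
    rw [List.mem_range] at hjr
    rw [PySem.List.pyGetD_natCast] at hjp
    exact ⟨j, hjr, by simpa using hjp, rfl⟩
  · rintro ⟨j, hjr, hjp, rfl⟩
    refine ⟨j, ?_, rfl⟩
    rw [List.mem_filter, List.mem_range, PySem.List.pyGetD_natCast]
    exact ⟨hjr, by simpa using hjp⟩

-- B's set equality holds iff the same per-position condition holds
lemma altB_iff (row : List (Option String)) (indexs : List Int) :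
    row_is_null_exept_alt row indexs = true ↔
      ∀ j, j < row.length → (valueIsNull (row.getD j none) = true ↔ ((j : Nat) : Int) ∉ indexs) := by
  unfold row_is_null_exept_alt
  rw [PySem.Set.equal_iff]
  simp only [PySem.Set.mem_ofList, mem_nonnull, List.mem_filter, decide_eq_true_eq]
  constructor
  · intro hall j hj
    constructor
    · intro hnull hmem
      rcases ((hall (j : Int)).mpr ⟨hmem, by omega, by exact_mod_cast hj⟩) with ⟨j', hj', hnn, hcast⟩
      have hjj : j' = j := by exact_mod_cast hcast
      rw [hjj, hnull] at hnn
      exact Bool.true_eq_false.mp hnn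
    · intro hnmem
      by_contra hnn
      have hnn' : valueIsNull (row.getD j none) = false := by
        cases h : valueIsNull (row.getD j none) <;> simp_all
      exact hnmem ((hall (j : Int)).mp ⟨j, hj, hnn', rfl⟩).1
  · intro hall x
    constructor
    · rintro ⟨j, hj, hnn, rfl⟩
      refine ⟨?_, by omega, by exact_mod_cast hj⟩
      by_contra hmem
      have := (hall j hj).mpr hmem
      rw [this] at hnn
      exact absurd hnn (by simp)
    · rintro ⟨hmem, hx0, hxlt⟩
      have hlt : x.toNat < row.length := by omega
      have hcast : ((x.toNat : Nat) : Int) = x := by omega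
      refine ⟨x.toNat, hlt, ?_, hcast⟩
      cases h : valueIsNull (row.getD x.toNat none)
      · rfl
      · exact absurd (hcast ▸ (hall x.toNat hlt).mp h) (by simpa using hmem)

-- ===== VERDICT (by name: the statement is the Claim_ definition above) =====
theorem row_is_null_exept_spec : Claim_equal_row_is_null_exept := by
  intro row indexs _
  unfold Spec_row_is_null_exept row_is_null_exept
  have hA := rowLoopA_iff indexs row 0
  have hB := altB_iff row indexs
  simp only [Nat.zero_add] at hA
  cases hA' : rowLoopA indexs 0 row <;> cases hB' : row_is_null_exept_alt row indexs
  · rfl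
  · exact absurd (hA.mpr (hB.mp hB')) (by simp [hA'])
  · exact absurd (hB.mpr (hA.mp hA')) (by simp [hB'])
  · rfl
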